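-- pv_equiv track=rewrite | github.com/pypi-data/pypi-mirror-402 | packages/hivetracered/hivetracered-1.0.8.tar.gz/hivetracered-1.0.8/src/hivetracered/attacks/types/text_structure_modification/json_transform_attack.py | transform
-- ===== SOURCE A (Python) =====
-- def transform(text: str) -> str:
--     """
--     Transform text into JSON format with alternating words as keys and values.
--
--     Args:
--         text: The input text to transform
--
--     Returns:
--         JSON string representation of the text
--     """
--     words = text.split()
--     result_list = []
--
--     # Process words in pairs, with odd-indexed words as keys and even-indexed as values
--     for i in range(0, len(words), 2):
--         key = words[i]
--         # If there's a next word, use it as value, otherwise use empty string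
--         value = words[i+1] if i+1 < len(words) else ""
--         result_list.append((key, value))
--
--     # Manually create JSON string to handle potential duplicate keys
--     json_string = "{\n"
--     for key, value in result_list:
--         json_string += f'  "{key}": "{value}",\n'
--     # Remove the trailing comma and newline, then close the JSON object
--     if result_list:
--         json_string = json_string[:-2] + "\n"
--     json_string += "}"
--     return json_string
-- ===== SOURCE B (Python) =====
-- def transform(text: str) -> str:
--     words = text.split()
--     keys = words[::2]
--     vals = words[1::2]
--     if len(vals) < len(keys):
--         vals = vals + [""]
--     lines = ['  "{}": "{}"'.format(k, v) for k, v in zip(keys, vals)]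
--     if not lines:
--         return "{\n}"
--     return "{\n" + ",\n".join(lines) + "\n}"
-- ===== Notes on version B (the rewrite author's own statement) =====
-- stated objective: simpler
-- what changed: Replaces A's index-stepping range(0,len,2) loop plus string concatenation with trailing-comma stripping by a recursive pairing of the word list and a str.join of preformatted lines.
import Mathlib
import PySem

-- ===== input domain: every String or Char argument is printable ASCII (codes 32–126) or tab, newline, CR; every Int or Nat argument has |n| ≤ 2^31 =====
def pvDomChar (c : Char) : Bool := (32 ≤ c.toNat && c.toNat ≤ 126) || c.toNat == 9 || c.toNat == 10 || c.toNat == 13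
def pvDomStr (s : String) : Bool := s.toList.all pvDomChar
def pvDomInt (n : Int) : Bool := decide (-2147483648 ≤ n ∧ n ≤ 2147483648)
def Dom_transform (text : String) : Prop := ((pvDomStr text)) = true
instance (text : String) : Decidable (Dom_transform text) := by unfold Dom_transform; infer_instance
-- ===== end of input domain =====

-- B replaces A's index-stepping loop and trailing-comma-strip concatenation by recursive pairing
-- of the word list plus a ",\n"-join (objective: simpler assembly, same cost).

-- ===== PORT A =====
def transform (text : String) : String :=
  let words := PySem.Str.split₀ text
  -- for i in range(0, len(words), 2): result_list.append((key, value))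
  let result_list : List (String × String) :=
    (PySem.List.pyRange 0 (words.length : Int) 2).foldl
      (fun acc i =>
        let key := PySem.List.pyGetD words i ""
        let value := if i + 1 < (words.length : Int) then PySem.List.pyGetD words (i + 1) "" else ""
        acc ++ [(key, value)]) []
  -- json_string = "{\n"; for key, value in result_list: json_string += f'  "{key}": "{value}",\n'
  let json0 := result_list.foldl
      (fun s kv => s ++ ("  \"" ++ kv.1 ++ "\": \"" ++ kv.2 ++ "\",\n")) "{\n"
  -- if result_list: json_string = json_string[:-2] + "\n"
  let json1 := if result_list ≠ [] then PySem.Str.slice json0 none (some (-2)) ++ "\n" else json0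
  json1 ++ "}"

-- ===== PORT B =====
-- _pairs(ws): recursion on the word list; 'ws[2:]' on a list matched as k :: v :: r is exactly r.
def pairsB : List String → List (String × String)
  | [] => []
  | [k] => [(k, "")]
  | k :: v :: r => (k, v) :: pairsB r

def transform_alt (text : String) : String :=
  let lines := (pairsB (PySem.Str.split₀ text)).map
      (fun kv => "  \"" ++ kv.1 ++ "\": \"" ++ kv.2 ++ "\"")
  if lines = [] then "{\n}" else "{\n" ++ PySem.Str.join ",\n" lines ++ "\n}"

-- ===== PRECONDITION & SPEC =====
def Spec_transform (text : String) (out : String) : Prop := out = transform_alt text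
instance (text : String) (out : String) : Decidable (Spec_transform text out) := by unfold Spec_transform; infer_instance

-- ===== CLAIM (what is proved, stated in full; the proofs are below) =====
def Claim_equal_transform : Prop := ∀ (text : String), Dom_transform text → Spec_transform text (transform text)

-- ===== LEMMAS AND PROOFS =====

lemma toList_openBrace : "{\n".toList = ['{', '\n'] := rfl
lemma toList_commaNl : ",\n".toList = [',', '\n'] := rfl
lemma toList_nl : "\n".toList = ['\n'] := rfl
lemma toList_close : "}".toList = ['}'] := rfl
lemma toList_nlClose : "\n}".toList = ['\n', '}'] := rfl

-- A's index loop produces exactly the recursive pairing of the word list.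
lemma listA (ws : List String) :
    (PySem.List.pyRange 0 (ws.length : Int) 2).map (fun i =>
      (PySem.List.pyGetD ws i "",
       if i + 1 < (ws.length : Int) then PySem.List.pyGetD ws (i + 1) "" else ""))
    = pairsB ws := by
  induction ws using pairsB.induct with
  | case1 =>
      simp [PySem.List.pyRange_of_pos 0 0 (by norm_num : (0:Int) < 2), pairsB]
  | case2 k =>
      rw [PySem.List.pyRange_of_pos 0 _ (by norm_num : (0:Int) < 2)]
      norm_num [pairsB, PySem.List.pyGetD_zero]
  | case3 k v r ih =>
      rw [PySem.List.pyRange_of_pos 0 _ (by norm_num : (0:Int) < 2)] at ih ⊢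
      have hm : (if (0:Int) < ((k :: v :: r).length : Int) then
            ((((k :: v :: r).length : Int) - 0 + 2 - 1) / 2).toNat else 0)
          = (if (0:Int) < (r.length : Int) then (((r.length : Int) - 0 + 2 - 1) / 2).toNat else 0) + 1 := by
        simp only [List.length_cons]
        push_cast
        split_ifs <;> omega
      rw [hm, List.range_succ_eq_map, List.map_cons, pairsB]
      refine congrArg₂ List.cons ?_ ?_
      · show (PySem.List.pyGetD (k :: v :: r) (0 + 2 * ((0:Nat):Int)) "",
            if 0 + 2 * ((0:Nat):Int) + 1 < ((k :: v :: r).length : Int) then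
              PySem.List.pyGetD (k :: v :: r) (0 + 2 * ((0:Nat):Int) + 1) "" else "") = (k, v)
        rw [show (0 + 2 * ((0:Nat):Int)) = ((0:Nat):Int) by norm_num]
        rw [show ((0:Nat):Int) + 1 = ((1:Nat):Int) by norm_num]
        rw [if_pos (by simp only [List.length_cons]; push_cast; omega)]
        simp only [PySem.List.pyGetD_natCast]
        simp [List.getD]
      · rw [← ih]; simp only [List.map_map]
        refine List.map_congr_left (fun n _ => ?_)
        simp only [Function.comp_apply]
        rw [show ((0:Int) + 2 * ((n.succ : Nat):Int)) = ((2 * n + 2 : Nat) : Int) by push_cast; ring]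
        rw [show ((2 * n + 2 : Nat) : Int) + 1 = ((2 * n + 3 : Nat) : Int) by push_cast; ring]
        rw [show ((0:Int) + 2 * ((n : Nat):Int)) = ((2 * n : Nat) : Int) by push_cast; ring]
        rw [show ((2 * n : Nat) : Int) + 1 = ((2 * n + 1 : Nat) : Int) by push_cast; ring]
        simp only [PySem.List.pyGetD_natCast]
        refine congrArg₂ Prod.mk ?_ ?_
        · simp [List.getD]
        · simp only [List.length_cons]
          by_cases h : ((2 * n + 1 : Nat) : Int) < (r.length : Int)
          · rw [if_pos h, if_pos (by push_cast at h ⊢; omega)]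
            simp [List.getD]
          · rw [if_neg h, if_neg (by push_cast at h ⊢; omega)]

-- A's string fold, with an arbitrary accumulator.
lemma foldStr (p : List (String × String)) (acc : String) :
    (p.foldl (fun s kv => s ++ ("  \"" ++ kv.1 ++ "\": \"" ++ kv.2 ++ "\",\n")) acc).toList
    = acc.toList
      ++ (p.map (fun kv =>
            ("  \"" ++ kv.1 ++ "\": \"" ++ kv.2 ++ "\",\n").toList)).flatten := by
  induction p generalizing acc with
  | nil => simp
  | cons kv rest ih =>
      simp only [List.foldl_cons, List.map_cons, List.flatten_cons, ih]
      simp [String.toList_append]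

-- concatenating "line + sep" pieces = join by sep, plus one trailing sep (nonempty case).
lemma flatJoin (ls : List (List Char)) (h : ls ≠ []) :
    (ls.map (· ++ [',', '\n'])).flatten = PySem.Chars.join [',', '\n'] ls ++ [',', '\n'] := by
  induction ls with
  | nil => exact absurd rfl h
  | cons x rest ih =>
      cases rest with
      | nil => simp [PySem.Chars.join_singleton]
      | cons y r =>
          rw [PySem.Chars.join_cons_cons]
          simp only [List.map_cons, List.flatten_cons] at ih ⊢
          rw [ih (by simp)]
          simp

theorem transform_spec_aux (text : String) : transform text = transform_alt text := by
  simp only [transform, transform_alt]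
  rw [PySem.List.foldl_append_singleton_eq_map, List.nil_append, listA]
  cases hp : pairsB (PySem.Str.split₀ text) with
  | nil => decide
  | cons kv rest =>
      rw [if_pos (by simp), if_neg (by simp)]
      apply String.toList_inj.mp
      have hfold := foldStr (kv :: rest) "{\n"
      simp only [String.toList_append, toList_openBrace] at hfold
      simp only [String.toList_append, PySem.Str.toList_slice, hfold, PySem.Str.toList_join,
        toList_openBrace, toList_commaNl, toList_nl, toList_close, toList_nlClose, List.map_map]
      have hcomp : (List.map (fun kv : String × String =>
            "  \"".toList ++ kv.1.toList ++ "\": \"".toList ++ kv.2.toList ++ "\",\n".toList)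
            (kv :: rest))
          = (List.map (String.toList ∘ fun kv : String × String =>
              "  \"" ++ kv.1 ++ "\": \"" ++ kv.2 ++ "\"") (kv :: rest)).map (· ++ [',', '\n']) := by
        simp only [List.map_map]
        refine List.map_congr_left (fun x _ => ?_)
        simp [String.toList_append]
      rw [hcomp, flatJoin _ (by simp)]
      set J := PySem.Chars.join [',', '\n']
          (List.map (String.toList ∘ fun kv : String × String =>
            "  \"" ++ kv.1 ++ "\": \"" ++ kv.2 ++ "\"") (kv :: rest)) with hJ
      have hsl : PySem.Chars.slice (['{', '\n'] ++ (J ++ [',', '\n'])) none (some (-2))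
          = ['{', '\n'] ++ J := by
        show PySem.List.slice (['{', '\n'] ++ (J ++ [',', '\n'])) none (some (-2)) = ['{', '\n'] ++ J
        rw [PySem.List.slice_to_neg_ofNat (['{', '\n'] ++ (J ++ [',', '\n'])) 2 (by norm_num)]
        rw [show ['{', '\n'] ++ (J ++ [',', '\n']) = (['{', '\n'] ++ J) ++ [',', '\n'] by simp]
        rw [show ((['{', '\n'] ++ J) ++ [',', '\n']).length - 2 = (['{', '\n'] ++ J).length by
          simp]
        exact List.take_left
      rw [hsl]
      simp

-- ===== VERDICT (by name: the statement is the Claim_ definition above) =====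
theorem transform_spec : Claim_equal_transform := by
  intro text _
  unfold Spec_transform
  exact transform_spec_aux text
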